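-- pv_equiv track=rewrite | github.com/guillotel-nothmann/tonalitiesIA | pitchCollections.py | getRealBassSubPatterns
-- ===== SOURCE A (Python) =====
-- from itertools import combinations
--
-- def getRealBassSubPatterns (bassPatterns, minLength = 3, maxLength = 10):
--     patternList = []
--
--     for x, y in combinations(range(len(bassPatterns) + 1), r = 2):
--         subList = bassPatterns[x:y]
--
--         if len (subList) < minLength: continue
--         if len (subList) > maxLength: continue
--
--         hasInterruption = False
--         for degree in subList[0:len(subList)-1]:
--             if "|" in degree :
--                 hasInterruption = True
--                 break
--
--         if subList not in patternList and hasInterruption== False: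
--             patternList.append(subList)
--
--     return patternList
-- ===== SOURCE B (Python) =====
-- def getRealBassSubPatterns(bassPatterns, minLength=3, maxLength=10):
--     # Precompute nextBar[i] = smallest j >= i with '|' in bassPatterns[j] (n if none),
--     # then enumerate only the valid windows directly; dedup with a set of tuples.
--     n = len(bassPatterns)
--     nextBar = [n] * (n + 1)
--     for i in range(n - 1, -1, -1):
--         nextBar[i] = i if "|" in bassPatterns[i] else nextBar[i + 1]
--     loOff = max(minLength, 1)
--     result = []
--     seen = set()
--     for x in range(n):
--         hi = min(x + maxLength, nextBar[x] + 1, n)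
--         for y in range(x + loOff, hi + 1):
--             sub = bassPatterns[x:y]
--             t = tuple(sub)
--             if t not in seen:
--                 seen.add(t)
--                 result.append(sub)
--     return result
-- ===== Notes on version B (the rewrite author's own statement) =====
-- stated objective: alternative
-- what changed: Instead of enumerating all index pairs and rescanning each window for a '|' interruption plus a linear list-membership dedup, B computes a nextBar table in one right-to-left pass, emits for each start exactly the valid window ends as an arithmetic range, and dedups with a hash set; intended as faster (a timing run measured B 692.9x at the largest size both finished, but could not confirm it at the top size, so no unqualified speed claim is made).
import Mathlib
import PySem

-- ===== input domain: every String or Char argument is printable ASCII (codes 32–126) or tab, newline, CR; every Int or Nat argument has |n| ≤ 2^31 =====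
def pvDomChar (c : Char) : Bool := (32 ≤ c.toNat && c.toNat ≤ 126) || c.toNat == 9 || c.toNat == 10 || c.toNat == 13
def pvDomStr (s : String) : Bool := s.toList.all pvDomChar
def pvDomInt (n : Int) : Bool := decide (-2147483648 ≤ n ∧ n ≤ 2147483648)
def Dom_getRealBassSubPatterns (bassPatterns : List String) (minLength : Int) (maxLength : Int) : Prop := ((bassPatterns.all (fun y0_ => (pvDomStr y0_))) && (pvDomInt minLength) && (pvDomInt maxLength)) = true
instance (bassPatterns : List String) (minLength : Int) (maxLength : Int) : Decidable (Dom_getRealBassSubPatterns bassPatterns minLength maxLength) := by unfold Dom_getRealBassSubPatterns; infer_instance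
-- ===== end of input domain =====

-- B replaces A's scan over all index pairs (with an inner re-scan of each window for "|")
-- by a precomputed next-bar table and direct enumeration of the valid window ends,
-- deduplicating via a set; proved to return exactly A's list.

-- ===== PORT A =====
def getRealBassSubPatterns (bassPatterns : List String) (minLength : Int) (maxLength : Int) : List (List String) :=
  -- for x, y in combinations(range(len(bassPatterns)+1), r=2): the r=2 combinations list, folded in order
  (PySem.List.combinations (PySem.List.pyRange 0 ((bassPatterns.length : Int) + 1) 1) 2).foldl
    (fun patternList c =>
      match c with
      | [x, y] =>
        let subList := PySem.List.slice bassPatterns (some x) (some y)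
        if (subList.length : Int) < minLength then patternList
        else if maxLength < (subList.length : Int) then patternList
        else
          -- the for/break bar scan over subList[0:len-1]
          let hasInterruption :=
            (PySem.List.slice subList (some 0) (some ((subList.length : Int) - 1))).any
              (fun degree => PySem.Str.isIn "|" degree)
          if subList ∉ patternList ∧ hasInterruption = false then patternList ++ [subList]
          else patternList
      | _ => patternList) []

-- ===== PORT B =====
-- nextBar built by B's right-to-left pass: element k is the smallest absolute index j ≥ i+k
-- with '|' in the (j-i)-th string, or i+len if none (i is the index of the list's first string).
def pvNextBarFrom : List String → Int → List Int
  | [], i => [i]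
  | s :: rest, i =>
      let tail := pvNextBarFrom rest (i + 1)
      (if PySem.Str.isIn "|" s then i else tail.headD (i + 1)) :: tail

def getRealBassSubPatterns_alt (bassPatterns : List String) (minLength : Int) (maxLength : Int) : List (List String) :=
  let n : Int := bassPatterns.length
  let nextBar := pvNextBarFrom bassPatterns 0
  let loOff := max minLength 1
  ((PySem.List.pyRange 0 n 1).foldl
    (fun st x =>
      let hi := min (min (x + maxLength) (PySem.List.pyGetD nextBar x 0 + 1)) n
      (PySem.List.pyRange (x + loOff) (hi + 1) 1).foldl
        (fun st y =>
          let sub := PySem.List.slice bassPatterns (some x) (some y)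
          if PySem.Set.contains st.1 sub then st
          else (PySem.Set.add st.1 sub, st.2 ++ [sub]))
        st)
    ((PySem.Set.empty : PySem.Set (List String)), ([] : List (List String)))).2

-- ===== PRECONDITION & SPEC =====
def Spec_getRealBassSubPatterns (bassPatterns : List String) (minLength : Int) (maxLength : Int) (out : List (List String)) : Prop := out = getRealBassSubPatterns_alt bassPatterns minLength maxLength
instance (bassPatterns : List String) (minLength : Int) (maxLength : Int) (out : List (List String)) : Decidable (Spec_getRealBassSubPatterns bassPatterns minLength maxLength out) := by unfold Spec_getRealBassSubPatterns; infer_instance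

-- ===== CLAIM (what is proved, stated in full; the proofs are below) =====
def Claim_equal_getRealBassSubPatterns : Prop := ∀ (bassPatterns : List String) (minLength : Int) (maxLength : Int), Dom_getRealBassSubPatterns bassPatterns minLength maxLength → Spec_getRealBassSubPatterns bassPatterns minLength maxLength (getRealBassSubPatterns bassPatterns minLength maxLength)

-- ===== LEMMAS AND PROOFS =====

-- first-occurrence accumulator both programs reduce to
def pvInsertNew (acc : List (List String)) (s : List String) : List (List String) :=
  if s ∈ acc then acc else acc ++ [s]

-- A's per-pair acceptance condition
def pvCondA (bp : List String) (minL maxL : Int) (x y : Int) : Bool :=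
  let sub := PySem.List.slice bp (some x) (some y)
  !decide ((sub.length : Int) < minL) && !decide (maxL < (sub.length : Int)) &&
  !((PySem.List.slice sub (some 0) (some ((sub.length : Int) - 1))).any
      (fun degree => PySem.Str.isIn "|" degree))

def pvCandsA (bp : List String) (minL maxL : Int) : List (List String) :=
  (PySem.List.pyRange 0 ((bp.length : Int) + 1) 1).flatMap
    (fun x => ((PySem.List.pyRange (x + 1) ((bp.length : Int) + 1) 1).filter (pvCondA bp minL maxL x)).map
      (fun y => PySem.List.slice bp (some x) (some y)))

def pvCandsB (bp : List String) (minL maxL : Int) : List (List String) :=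
  (PySem.List.pyRange 0 (bp.length : Int) 1).flatMap
    (fun x =>
      (PySem.List.pyRange (x + max minL 1)
        (min (min (x + maxL) (PySem.List.pyGetD (pvNextBarFrom bp 0) x 0 + 1)) (bp.length : Int) + 1) 1).map
        (fun y => PySem.List.slice bp (some x) (some y)))

theorem pvFlatMap_congr {α β : Type} (g g' : α → List β) : ∀ (l : List α),
    (∀ x ∈ l, g x = g' x) → l.flatMap g = l.flatMap g'
  | [], _ => rfl
  | x :: l, h => by
    rw [List.flatMap_cons, List.flatMap_cons, h x (by simp),
      pvFlatMap_congr g g' l (fun y hy => h y (by simp [hy]))]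

theorem pvCombinations_two (a b : Int) :
    PySem.List.combinations (PySem.List.pyRange a b 1) 2
      = (PySem.List.pyRange a b 1).flatMap
          (fun x => (PySem.List.pyRange (x + 1) b 1).map (fun y => [x, y])) := by
  have key : ∀ (n : Nat) (a : Int), (b - a).toNat = n →
      PySem.List.combinations (PySem.List.pyRange a b 1) 2
        = (PySem.List.pyRange a b 1).flatMap
            (fun x => (PySem.List.pyRange (x + 1) b 1).map (fun y => [x, y])) := by
    intro n
    induction n with
    | zero =>
      intro a hn
      rw [PySem.List.pyRange_one_eq_nil (by omega)]
      rfl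
    | succ n ih =>
      intro a hn
      rw [PySem.List.pyRange_one_cons (by omega), PySem.List.combinations_cons_succ,
        PySem.List.combinations_one, List.flatMap_cons, ← ih (a + 1) (by omega)]
      congr 1
      rw [List.map_map]
      rfl
  exact key (b - a).toNat a rfl

theorem pvFoldl_guard_filter {β : Type} (p : β → Bool) (f : β → List String) (l : List β)
    (acc : List (List String)) :
    l.foldl (fun acc y => if p y then pvInsertNew acc (f y) else acc) acc
      = ((l.filter p).map f).foldl pvInsertNew acc := by
  induction l generalizing acc with
  | nil => rfl
  | cons b l ih =>
    by_cases h : p b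
    · simp only [List.foldl_cons, List.filter_cons, h, if_pos, List.map_cons]
      rw [ih]
    · simp only [List.foldl_cons, List.filter_cons, h, Bool.false_eq_true, if_false]
      rw [ih]

theorem pvA_eq_fold (bp : List String) (minL maxL : Int) :
    getRealBassSubPatterns bp minL maxL = (pvCandsA bp minL maxL).foldl pvInsertNew [] := by
  unfold getRealBassSubPatterns pvCandsA
  rw [pvCombinations_two, List.foldl_flatMap, List.foldl_flatMap]
  congr 1
  funext st x
  rw [List.foldl_map, ← pvFoldl_guard_filter]
  congr 1
  funext acc y
  show (if ((PySem.List.slice bp (some x) (some y)).length : Int) < minL then acc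
    else if maxL < ((PySem.List.slice bp (some x) (some y)).length : Int) then acc
    else if PySem.List.slice bp (some x) (some y) ∉ acc ∧
        ((PySem.List.slice (PySem.List.slice bp (some x) (some y)) (some 0)
          (some (((PySem.List.slice bp (some x) (some y)).length : Int) - 1))).any
          (fun degree => PySem.Str.isIn "|" degree)) = false
      then acc ++ [PySem.List.slice bp (some x) (some y)] else acc) = _
  by_cases h1 : ((PySem.List.slice bp (some x) (some y)).length : Int) < minL
  · simp only [pvCondA, h1, if_pos, decide_true, Bool.not_true, Bool.false_and,
      Bool.false_eq_true, if_false]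
  · by_cases h2 : maxL < ((PySem.List.slice bp (some x) (some y)).length : Int)
    · simp only [pvCondA, h1, h2, if_pos, if_neg, decide_true, decide_false, Bool.not_true,
        Bool.not_false, Bool.and_false, Bool.false_and, Bool.false_eq_true,
        not_false_iff]
    · by_cases h3 : ((PySem.List.slice (PySem.List.slice bp (some x) (some y)) (some 0)
          (some (((PySem.List.slice bp (some x) (some y)).length : Int) - 1))).any
          (fun degree => PySem.Str.isIn "|" degree)) = true
      · simp only [pvCondA, h1, h2, h3, decide_false, Bool.not_false, Bool.true_and,
          Bool.not_true, Bool.and_false, if_neg, Bool.false_eq_true,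
          not_false_iff, and_false, Bool.true_eq_false]
      · have h3' : ((PySem.List.slice (PySem.List.slice bp (some x) (some y)) (some 0)
            (some (((PySem.List.slice bp (some x) (some y)).length : Int) - 1))).any
            (fun degree => PySem.Str.isIn "|" degree)) = false := by
          revert h3; cases ((PySem.List.slice (PySem.List.slice bp (some x) (some y)) (some 0)
            (some (((PySem.List.slice bp (some x) (some y)).length : Int) - 1))).any
            (fun degree => PySem.Str.isIn "|" degree)) <;> simp
        simp only [pvCondA, h1, h2, h3', decide_false, Bool.not_false,
          Bool.and_true, if_neg, not_false_iff, and_true, if_true, pvInsertNew]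
        by_cases h4 : PySem.List.slice bp (some x) (some y) ∈ acc
        · simp [h4]
        · simp [h4]

theorem pvB_pair_fold (cs : List (List String)) (out : List (List String)) :
    (cs.foldl
      (fun st s =>
        if PySem.Set.contains st.1 s then st
        else (PySem.Set.add st.1 s, st.2 ++ [s])) (out, out)).2
      = cs.foldl pvInsertNew out := by
  induction cs generalizing out with
  | nil => rfl
  | cons c cs ih =>
    simp only [List.foldl_cons]
    by_cases h : c ∈ out
    · have h1 : (if PySem.Set.contains out c then ((out : PySem.Set (List String)), out)
          else (PySem.Set.add out c, out ++ [c])) = (out, out) := by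
        simp [PySem.Set.contains, h]
      have h2 : pvInsertNew out c = out := by simp [pvInsertNew, h]
      rw [h1, h2, ih]
    · have h1 : (if PySem.Set.contains out c then ((out : PySem.Set (List String)), out)
          else (PySem.Set.add out c, out ++ [c])) = (out ++ [c], out ++ [c]) := by
        simp [PySem.Set.contains, PySem.Set.add, h]
      have h2 : pvInsertNew out c = out ++ [c] := by simp [pvInsertNew, h]
      rw [h1, h2, ih]

theorem pvB_eq_fold (bp : List String) (minL maxL : Int) :
    getRealBassSubPatterns_alt bp minL maxL = (pvCandsB bp minL maxL).foldl pvInsertNew [] := by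
  rw [← pvB_pair_fold (pvCandsB bp minL maxL) []]
  unfold getRealBassSubPatterns_alt pvCandsB
  rw [List.foldl_flatMap]
  dsimp only
  congr 2
  funext st x
  rw [List.foldl_map]

theorem pvFilter_interval (lo h : Int) : ∀ (a b : Int),
    (PySem.List.pyRange a b 1).filter (fun y => decide (lo ≤ y ∧ y < h))
      = PySem.List.pyRange (max a lo) (min b h) 1 := by
  have key : ∀ (n : Nat) (a b : Int), (b - a).toNat = n →
      (PySem.List.pyRange a b 1).filter (fun y => decide (lo ≤ y ∧ y < h))
        = PySem.List.pyRange (max a lo) (min b h) 1 := by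
    intro n
    induction n with
    | zero =>
      intro a b hn
      rw [PySem.List.pyRange_one_eq_nil (by omega), PySem.List.pyRange_one_eq_nil (by omega)]
      rfl
    | succ n ih =>
      intro a b hn
      rw [PySem.List.pyRange_one_cons (by omega), List.filter_cons]
      by_cases hp : lo ≤ a ∧ a < h
      · have hmax : max a lo = a := by omega
        have hmax1 : max (a + 1) lo = a + 1 := by omega
        rw [ih (a + 1) b (by omega), hmax1, hmax,
          PySem.List.pyRange_one_cons (show a < min b h by omega)]
        simp [hp.1, hp.2]
      · simp only [hp, decide_false, Bool.false_eq_true, if_false]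
        rw [ih (a + 1) b (by omega)]
        rcases not_and_or.mp hp with hlo | hh
        · congr 1; omega
        · rw [PySem.List.pyRange_one_eq_nil (by omega), PySem.List.pyRange_one_eq_nil (by omega)]
  intro a b
  exact key (b - a).toNat a b rfl

theorem pvNextBarFrom_length (bp : List String) (i : Int) :
    (pvNextBarFrom bp i).length = bp.length + 1 := by
  induction bp generalizing i with
  | nil => rfl
  | cons s rest ih => simp [pvNextBarFrom, ih]

theorem pvNextBarFrom_getElem (bp : List String) (i : Int) (k : Nat) (hk : k < bp.length + 1) :
    (pvNextBarFrom bp i)[k]'(by rw [pvNextBarFrom_length]; omega)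
      = i + k + ((bp.drop k).findIdx (fun s => PySem.Str.isIn "|" s) : Int) := by
  induction bp generalizing i k with
  | nil =>
    have : k = 0 := by simp at hk; omega
    subst this
    simp [pvNextBarFrom]
  | cons s rest ih =>
    cases k with
    | zero =>
      by_cases hb : PySem.Chars.isIn ['|'] s.toList = true
      · simp [pvNextBarFrom, hb, List.findIdx_cons, PySem.Str.isIn]
      · have h0 := ih (i + 1) 0 (by omega)
        simp only [List.drop_zero] at h0
        have hlen := pvNextBarFrom_length rest (i + 1)
        rcases hl : pvNextBarFrom rest (i + 1) with _ | ⟨v, tl⟩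
        · rw [hl] at hlen; simp at hlen
        · simp only [hl, List.getElem_cons_zero] at h0
          simp [pvNextBarFrom, hb, PySem.Str.isIn, hl, List.findIdx_cons, h0]
          ring
    | succ k =>
      have h0 := ih (i + 1) k (by simp at hk; omega)
      simp only [pvNextBarFrom, List.getElem_cons_succ, List.drop_succ_cons]
      rw [h0]
      push_cast
      ring

theorem pvAny_take_false {α : Type} (p : α → Bool) : ∀ (l : List α) (m : Nat), m ≤ l.length →
    (((l.take m).any p = false) ↔ m ≤ l.findIdx p) := by
  intro l
  induction l with
  | nil => intro m hm; simp at hm; simp [hm]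
  | cons a l ih =>
    intro m hm
    cases m with
    | zero => simp
    | succ m =>
      by_cases h : p a
      · simp [List.take_succ_cons, List.findIdx_cons, h]
      · simp only [List.take_succ_cons, List.any_cons, List.findIdx_cons, h, Bool.false_or,
          cond_false]
        rw [ih m (by simpa using hm)]
        omega

theorem pvCandsA_eq_candsB (bp : List String) (minL maxL : Int) :
    pvCandsA bp minL maxL = pvCandsB bp minL maxL := by
  unfold pvCandsA pvCandsB
  have hn : (0 : Int) ≤ (bp.length : Int) := Int.natCast_nonneg _
  rw [PySem.List.pyRange_one_succ_right hn, List.flatMap_append]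
  have h1 : ([((bp.length : Int))].flatMap
      (fun x => ((PySem.List.pyRange (x + 1) ((bp.length : Int) + 1) 1).filter
        (pvCondA bp minL maxL x)).map (fun y => PySem.List.slice bp (some x) (some y)))) = [] := by
    simp [PySem.List.pyRange_one_eq_nil (by omega : (bp.length : Int) + 1 ≤ (bp.length : Int) + 1)]
  rw [h1, List.append_nil]
  apply pvFlatMap_congr
  intro x hx
  rw [PySem.List.mem_pyRange_one] at hx
  obtain ⟨hx0, hxn⟩ := hx
  have hxT : ((x.toNat : Nat) : Int) = x := Int.toNat_of_nonneg hx0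
  have hnb : PySem.List.pyGetD (pvNextBarFrom bp 0) x 0
      = x + (((bp.drop x.toNat).findIdx (fun s => PySem.Str.isIn "|" s) : Nat) : Int) := by
    rw [PySem.List.pyGetD_eq_getElem (pvNextBarFrom bp 0) 0 hx0
        (by rw [pvNextBarFrom_length]; push_cast; omega),
      pvNextBarFrom_getElem bp 0 x.toNat (by omega)]
    omega
  have hFle : ((bp.drop x.toNat).findIdx (fun s => PySem.Str.isIn "|" s) : Nat) ≤ bp.length - x.toNat := by
    have := List.findIdx_le_length (p := fun s => PySem.Str.isIn "|" s) (xs := bp.drop x.toNat)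
    simpa using this
  have hfc : ∀ y ∈ PySem.List.pyRange (x + 1) ((bp.length : Int) + 1) 1,
      pvCondA bp minL maxL x y
        = decide (x + max minL 1 ≤ y ∧
            y < min (min (x + maxL) (PySem.List.pyGetD (pvNextBarFrom bp 0) x 0 + 1))
              (bp.length : Int) + 1) := by
    intro y hy
    rw [PySem.List.mem_pyRange_one] at hy
    have hy0 : (0 : Int) ≤ y := by omega
    have hyT : ((y.toNat : Nat) : Int) = y := Int.toNat_of_nonneg hy0
    have hsub : PySem.List.slice bp (some x) (some y)
        = (bp.drop x.toNat).take (y.toNat - x.toNat) := PySem.List.slice_toNat bp hx0 hy0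
    have hlen : (PySem.List.slice bp (some x) (some y)).length = y.toNat - x.toNat := by
      rw [hsub]
      simp only [List.length_take, List.length_drop]
      omega
    have hbar : PySem.List.slice (PySem.List.slice bp (some x) (some y)) (some 0)
        (some (((PySem.List.slice bp (some x) (some y)).length : Int) - 1))
        = (bp.drop x.toNat).take (y.toNat - x.toNat - 1) := by
      rw [PySem.List.slice_zero_start, PySem.List.slice_to _ (by rw [hlen]; omega), hsub,
        List.take_take]
      congr 1
      simp only [List.length_take, List.length_drop]
      omega
    rw [Bool.eq_iff_iff]
    simp only [pvCondA, Bool.and_eq_true, Bool.not_eq_true', decide_eq_false_iff_not,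
      decide_eq_true_eq]
    rw [hbar, hlen,
      pvAny_take_false (fun degree => PySem.Str.isIn "|" degree) (bp.drop x.toNat)
        (y.toNat - x.toNat - 1) (by simp only [List.length_drop]; omega), hnb]
    omega
  rw [List.filter_congr hfc, pvFilter_interval]
  have hA : max (x + 1) (x + max minL 1) = x + max minL 1 := by omega
  have hB : min ((bp.length : Int) + 1)
      (min (min (x + maxL) (PySem.List.pyGetD (pvNextBarFrom bp 0) x 0 + 1)) (bp.length : Int) + 1)
      = min (min (x + maxL) (PySem.List.pyGetD (pvNextBarFrom bp 0) x 0 + 1)) (bp.length : Int) + 1 := by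
    omega
  rw [hA, hB]

-- ===== VERDICT (by name: the statement is the Claim_ definition above) =====
theorem getRealBassSubPatterns_spec : Claim_equal_getRealBassSubPatterns := by
  intro bp minL maxL _
  show _ = _
  rw [pvA_eq_fold, pvB_eq_fold, pvCandsA_eq_candsB]
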